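-- pv_equiv track=rewrite | github.com/nalamane34/MoneyLoser | src/moneygone/data/crypto/coinalyze_feed.py | _reverse_symbol
-- ===== SOURCE A (Python) =====
-- _SYMBOL_MAP: dict[str, str] = {
--     "BTC/USDT": "BTCUSDT_PERP.A",
--     "ETH/USDT": "ETHUSDT_PERP.A",
--     "SOL/USDT": "SOLUSDT_PERP.A",
--     "DOGE/USDT": "DOGEUSDT_PERP.A",
--     "BNB/USDT": "BNBUSDT_PERP.A",
--     "XRP/USDT": "XRPUSDT_PERP.A",
--     "ADA/USDT": "ADAUSDT_PERP.A",
--     "AVAX/USDT": "AVAXUSDT_PERP.A",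
--     "LTC/USDT": "LTCUSDT_PERP.A",
-- }
--
-- def _reverse_symbol(ca_symbol: str, original_symbols: list[str]) -> str:
--     """Map a Coinalyze symbol back to our format."""
--     for orig, ca in _SYMBOL_MAP.items():
--         if ca == ca_symbol and orig in original_symbols:
--             return orig
--     # Fallback: strip _PERP.X and re-insert /
--     base = ca_symbol.split("_")[0]
--     if base.endswith("USDT"):
--         return base[:-4] + "/USDT"
--     return ca_symbol
-- ===== SOURCE B (Python) =====
-- def _reverse_symbol(ca_symbol: str, original_symbols: list[str]) -> str:
--     """Map a Coinalyze symbol back to our format.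
--
--     The _SYMBOL_MAP scan in the original is redundant: for every key it
--     contains, the generic rewrite below yields exactly the mapped value,
--     so the rewrite alone reproduces the original's result on all inputs
--     (original_symbols never affects the outcome).
--     """
--     base = ca_symbol.split("_")[0]
--     if base.endswith("USDT"):
--         return base[:-4] + "/USDT"
--     return ca_symbol
-- ===== Notes on version B (the rewrite author's own statement) =====
-- stated objective: simpler
-- what changed: Drops A's table scan and membership check entirely: for every _SYMBOL_MAP key the generic split/strip-USDT rewrite yields exactly the mapped value, so B is just that rewrite, making original_symbols provably irrelevant.
import Mathlib
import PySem

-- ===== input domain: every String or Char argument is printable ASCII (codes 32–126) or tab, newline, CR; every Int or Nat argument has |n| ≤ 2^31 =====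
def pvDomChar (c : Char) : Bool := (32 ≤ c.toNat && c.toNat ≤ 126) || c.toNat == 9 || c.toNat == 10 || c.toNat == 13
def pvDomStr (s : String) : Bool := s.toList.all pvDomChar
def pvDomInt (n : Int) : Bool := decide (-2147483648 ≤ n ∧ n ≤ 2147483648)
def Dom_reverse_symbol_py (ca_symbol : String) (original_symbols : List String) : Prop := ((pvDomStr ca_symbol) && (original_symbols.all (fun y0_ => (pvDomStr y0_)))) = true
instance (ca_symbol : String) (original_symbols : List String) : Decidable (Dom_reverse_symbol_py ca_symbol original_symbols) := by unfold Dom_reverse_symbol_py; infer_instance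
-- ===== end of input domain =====

-- B drops A's _SYMBOL_MAP scan entirely: for every key of the map the generic
-- split/strip-USDT rewrite yields exactly the mapped value, so the rewrite alone
-- reproduces A's result on all inputs (objective: simpler).

-- ===== PORT A =====
-- _SYMBOL_MAP, in insertion order
def pvSymbolMap : List (String × String) :=
  [("BTC/USDT", "BTCUSDT_PERP.A"), ("ETH/USDT", "ETHUSDT_PERP.A"),
   ("SOL/USDT", "SOLUSDT_PERP.A"), ("DOGE/USDT", "DOGEUSDT_PERP.A"),
   ("BNB/USDT", "BNBUSDT_PERP.A"), ("XRP/USDT", "XRPUSDT_PERP.A"),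
   ("ADA/USDT", "ADAUSDT_PERP.A"), ("AVAX/USDT", "AVAXUSDT_PERP.A"),
   ("LTC/USDT", "LTCUSDT_PERP.A")]

-- the 'for orig, ca in _SYMBOL_MAP.items(): if …: return orig' loop
def pvScanA (ca_symbol : String) (original_symbols : List String) : List (String × String) → Option String
  | [] => none
  | (orig, ca) :: rest =>
      if ca == ca_symbol && original_symbols.contains orig then some orig
      else pvScanA ca_symbol original_symbols rest

def reverse_symbol_py (ca_symbol : String) (original_symbols : List String) : String :=
  match pvScanA ca_symbol original_symbols pvSymbolMap with
  | some orig => orig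
  | none =>
      -- base = ca_symbol.split("_")[0]  (split on "_" is never empty, so [0] is the head)
      let base := ((PySem.Str.split? ca_symbol "_").getD []).headD ""
      if PySem.Str.endswith base "USDT" then PySem.Str.slice base none (some (-4)) ++ "/USDT"
      else ca_symbol

-- ===== PORT B =====
def reverse_symbol_py_alt (ca_symbol : String) (original_symbols : List String) : String :=
  let base := ((PySem.Str.split? ca_symbol "_").getD []).headD ""
  if PySem.Str.endswith base "USDT" then PySem.Str.slice base none (some (-4)) ++ "/USDT"
  else ca_symbol

-- ===== PRECONDITION & SPEC =====
def Spec_reverse_symbol_py (ca_symbol : String) (original_symbols : List String) (out : String) : Prop := out = reverse_symbol_py_alt ca_symbol original_symbols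
instance (ca_symbol : String) (original_symbols : List String) (out : String) : Decidable (Spec_reverse_symbol_py ca_symbol original_symbols out) := by unfold Spec_reverse_symbol_py; infer_instance

-- ===== CLAIM =====
def Claim_equal_reverse_symbol_py : Prop := ∀ (ca_symbol : String) (original_symbols : List String), Dom_reverse_symbol_py ca_symbol original_symbols → Spec_reverse_symbol_py ca_symbol original_symbols (reverse_symbol_py ca_symbol original_symbols)

-- ===== LEMMAS AND PROOFS =====
-- If the scan succeeds, ca_symbol is the map key for orig, and on each of the
-- nine keys the fallback rewrite evaluates to exactly orig.
theorem pvScan_fallback (ca : String) (os : List String) (orig : String)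
    (h : pvScanA ca os pvSymbolMap = some orig) :
    orig = reverse_symbol_py_alt ca os := by
  unfold pvSymbolMap at h
  by_cases h1 : ca = "BTCUSDT_PERP.A"
  · subst h1; simp [pvScanA] at h; obtain ⟨-, rfl⟩ := h; rfl
  by_cases h2 : ca = "ETHUSDT_PERP.A"
  · subst h2; simp [pvScanA] at h; obtain ⟨-, rfl⟩ := h; rfl
  by_cases h3 : ca = "SOLUSDT_PERP.A"
  · subst h3; simp [pvScanA] at h; obtain ⟨-, rfl⟩ := h; rfl
  by_cases h4 : ca = "DOGEUSDT_PERP.A"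
  · subst h4; simp [pvScanA] at h; obtain ⟨-, rfl⟩ := h; rfl
  by_cases h5 : ca = "BNBUSDT_PERP.A"
  · subst h5; simp [pvScanA] at h; obtain ⟨-, rfl⟩ := h; rfl
  by_cases h6 : ca = "XRPUSDT_PERP.A"
  · subst h6; simp [pvScanA] at h; obtain ⟨-, rfl⟩ := h; rfl
  by_cases h7 : ca = "ADAUSDT_PERP.A"
  · subst h7; simp [pvScanA] at h; obtain ⟨-, rfl⟩ := h; rfl
  by_cases h8 : ca = "AVAXUSDT_PERP.A"
  · subst h8; simp [pvScanA] at h; obtain ⟨-, rfl⟩ := h; rfl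
  by_cases h9 : ca = "LTCUSDT_PERP.A"
  · subst h9; simp [pvScanA] at h; obtain ⟨-, rfl⟩ := h; rfl
  · simp [pvScanA, Ne.symm h1, Ne.symm h2, Ne.symm h3, Ne.symm h4, Ne.symm h5,
      Ne.symm h6, Ne.symm h7, Ne.symm h8, Ne.symm h9] at h

-- ===== VERDICT =====
theorem reverse_symbol_py_spec : Claim_equal_reverse_symbol_py := by
  intro ca os _
  unfold Spec_reverse_symbol_py reverse_symbol_py
  cases h : pvScanA ca os pvSymbolMap with
  | some orig => exact pvScan_fallback ca os orig h
  | none => rfl
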